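-- pv_equiv track=rewrite | github.com/LuckJMG/Tareas-Progra | SMOJ/UVA 8/spytify.py | artistas_x_genero
-- ===== SOURCE A (Python) =====
-- def artistas_x_genero(artists):
--     # Variables
--     genre_data = {}
--     genre_list = []
--     result = []
--
--     # Count artists in each genre
--     for artist in artists:
--         genre = artist[1]
--         if genre not in genre_data:
--             genre_list.append(genre)
--             genre_data[genre] = [genre, 0, []]
--         genre_data[genre][1] += 1
--         genre_data[genre][2].append(artist[0])
--
--     # Format
--     genre_list.sort()
--     for genre in genre_list:
--         genre_data[genre][2].sort()
--         result.append(genre_data[genre])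
--
--     return(result)
-- ===== SOURCE B (Python) =====
-- def artistas_x_genero(artists):
--     result = []
--     for genre in sorted({g for _, g in artists}):
--         names = sorted(n for n, g in artists if g == genre)
--         result.append([genre, len(names), names])
--     return result
-- ===== Notes on version B (the rewrite author's own statement) =====
-- stated objective: simpler
-- what changed: Replaces the dict-accumulator pass plus per-genre mutation with a direct construction: sort the set of genres once, then build each row by filtering the names of that genre and sorting them; no dict, no counters, no in-place mutation.
import Mathlib
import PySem

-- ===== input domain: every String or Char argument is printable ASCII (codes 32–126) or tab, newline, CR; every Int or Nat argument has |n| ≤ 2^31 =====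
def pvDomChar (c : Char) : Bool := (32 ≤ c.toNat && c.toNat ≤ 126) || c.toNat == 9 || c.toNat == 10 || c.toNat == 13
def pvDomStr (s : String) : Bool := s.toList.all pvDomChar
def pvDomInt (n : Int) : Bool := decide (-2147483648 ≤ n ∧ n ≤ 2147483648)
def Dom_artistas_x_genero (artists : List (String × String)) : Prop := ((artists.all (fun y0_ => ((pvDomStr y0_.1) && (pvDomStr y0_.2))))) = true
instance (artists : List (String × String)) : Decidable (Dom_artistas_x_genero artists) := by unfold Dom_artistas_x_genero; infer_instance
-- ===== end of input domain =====

-- B replaces A's dict-accumulator pass by a direct construction over the sorted set of genres,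
-- filtering and sorting the names of each genre; objective: simpler (no dict, no counters, no mutation).

-- ===== PORT A =====
-- one iteration of A's loop: genre bookkeeping, then the in-place
-- 'genre_data[genre][1] += 1; genre_data[genre][2].append(...)' ported as lookup-then-reinsert
-- (the key is always present at that point, so the getD default is never used)
def pvStepA (st : PySem.Dict String (String × Int × List String) × List String)
    (artist : String × String) : PySem.Dict String (String × Int × List String) × List String :=
  let genre := artist.2
  let st1 := if st.1.contains genre then st
             else (st.1.insert genre (genre, 0, ([] : List String)), st.2 ++ [genre])
  let v := (st1.1.get? genre).getD (genre, 0, [])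
  (st1.1.insert genre (v.1, v.2.1 + 1, v.2.2 ++ [artist.1]), st1.2)

def artistas_x_genero (artists : List (String × String)) : List (String × Int × List String) :=
  let st := artists.foldl pvStepA (PySem.Dict.empty, [])
  let genreList := PySem.List.sorted st.2 (fun g => g) false
  genreList.map (fun g =>
    let v := (st.1.get? g).getD (g, 0, [])
    (v.1, v.2.1, PySem.List.sorted v.2.2 (fun n => n) false))

-- ===== PORT B =====
def artistas_x_genero_alt (artists : List (String × String)) : List (String × Int × List String) :=
  (PySem.List.sorted (PySem.Set.ofList (artists.map (fun a => a.2))) (fun g => g) false).map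
    (fun genre =>
      let names := PySem.List.sorted ((artists.filter (fun a => a.2 == genre)).map (fun a => a.1))
                     (fun n => n) false
      (genre, (names.length : Int), names))

-- ===== PRECONDITION & SPEC =====
def Spec_artistas_x_genero (artists : List (String × String)) (out : List (String × Int × List String)) : Prop := out = artistas_x_genero_alt artists
instance (artists : List (String × String)) (out : List (String × Int × List String)) : Decidable (Spec_artistas_x_genero artists out) := by unfold Spec_artistas_x_genero; infer_instance

-- ===== CLAIM (what is proved, stated in full; the proofs are below) =====
def Claim_equal_artistas_x_genero : Prop := ∀ (artists : List (String × String)), Dom_artistas_x_genero artists → Spec_artistas_x_genero artists (artistas_x_genero artists)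

-- ===== LEMMAS AND PROOFS =====

-- invariant of A's loop: the genre list is the set of genres seen so far, and the dict maps each
-- seen genre g to (g, number of its artists so far, their names in input order)
theorem pvLoopA_inv (l : List (String × String))
    (d : PySem.Dict String (String × Int × List String)) (gl : List String)
    (cnt : String → Int) (nm : String → List String)
    (hc : ∀ g, d.contains g = decide (g ∈ gl))
    (hv : ∀ g, g ∈ gl → d.get? g = some (g, cnt g, nm g))
    (hz : ∀ g, g ∉ gl → cnt g = 0 ∧ nm g = []) :
    (l.foldl pvStepA (d, gl)).2 = PySem.Set.update gl (l.map (fun a => a.2)) ∧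
    (∀ g, ((l.foldl pvStepA (d, gl)).1.contains g = decide (g ∈ (l.foldl pvStepA (d, gl)).2)) ∧
      (g ∈ (l.foldl pvStepA (d, gl)).2 →
      (l.foldl pvStepA (d, gl)).1.get? g =
        some (g, cnt g + ((l.map (fun a => a.2)).count g : Int),
              nm g ++ (l.filter (fun a => a.2 == g)).map (fun a => a.1)))) := by
  induction l generalizing d gl cnt nm with
  | nil =>
    refine ⟨rfl, fun g => ⟨hc g, fun hg => ?_⟩⟩
    simp [hv g hg]
  | cons a t ih =>
    by_cases hmem : a.2 ∈ gl
    · -- genre already present: the genre list is unchanged, its entry is updated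
      have hcont : d.contains a.2 = true := by rw [hc]; simpa
      have hstep : pvStepA (d, gl) a =
          (d.insert a.2 (a.2, cnt a.2 + 1, nm a.2 ++ [a.1]), gl) := by
        simp [pvStepA, hcont, hv a.2 hmem]
      have hgl1 : PySem.Set.add gl a.2 = gl := by
        simp [PySem.Set.add, hmem]
      have ih' := ih (d.insert a.2 (a.2, cnt a.2 + 1, nm a.2 ++ [a.1])) gl
        (fun g => if g = a.2 then cnt g + 1 else cnt g)
        (fun g => if g = a.2 then nm g ++ [a.1] else nm g)
        (fun g => by
          rw [PySem.Dict.contains_insert]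
          by_cases h : g = a.2 <;> simp [h, hc, hmem])
        (fun g hg => by
          by_cases h : g = a.2
          · subst h; simp [PySem.Dict.get?_insert_self]
          · rw [PySem.Dict.get?_insert_of_ne _ _ h]
            simp [h, hv g hg])
        (fun g hg => by
          have h : g ≠ a.2 := fun e => hg (e ▸ hmem)
          simp [h, hz g hg])
      rw [List.foldl_cons, hstep]
      refine ⟨?_, fun g => ⟨(ih'.2 g).1, fun hg => ?_⟩⟩
      · rw [ih'.1]; simp [PySem.Set.update, hgl1]
      · rw [(ih'.2 g).2 hg]
        by_cases h : g = a.2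
        · simp [h]; ring_nf
        · simp [h, Ne.symm h]
    · -- fresh genre: appended to the genre list, entry initialised then updated
      have hcont : d.contains a.2 = false := by rw [hc]; simpa
      have hz2 := hz a.2 hmem
      have hstep : pvStepA (d, gl) a =
          ((d.insert a.2 (a.2, 0, [])).insert a.2 (a.2, 1, [a.1]), gl ++ [a.2]) := by
        simp [pvStepA, hcont, PySem.Dict.get?_insert_self]
      have hgl1 : PySem.Set.add gl a.2 = gl ++ [a.2] := by
        simp [PySem.Set.add, hmem]
      have ih' := ih ((d.insert a.2 (a.2, 0, [])).insert a.2 (a.2, 1, [a.1])) (gl ++ [a.2])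
        (fun g => if g = a.2 then cnt g + 1 else cnt g)
        (fun g => if g = a.2 then nm g ++ [a.1] else nm g)
        (fun g => by
          rw [PySem.Dict.contains_insert, PySem.Dict.contains_insert]
          by_cases h : g = a.2 <;> simp [h, hc])
        (fun g hg => by
          by_cases h : g = a.2
          · subst h; simp [PySem.Dict.get?_insert_self, hz2.1, hz2.2]
          · rw [PySem.Dict.get?_insert_of_ne _ _ h, PySem.Dict.get?_insert_of_ne _ _ h]
            have hg' : g ∈ gl := by simpa [h] using hg
            simp [h, hv g hg'])
        (fun g hg => by
          have h : g ≠ a.2 := by simp at hg; exact fun e => hg.2 e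
          have hg' : g ∉ gl := by simp at hg; exact hg.1
          simp [h, hz g hg'])
      rw [List.foldl_cons, hstep]
      refine ⟨?_, fun g => ⟨(ih'.2 g).1, fun hg => ?_⟩⟩
      · rw [ih'.1]; simp [PySem.Set.update, hgl1]
      · rw [(ih'.2 g).2 hg]
        by_cases h : g = a.2
        · simp [h]; ring_nf
        · simp [h, Ne.symm h]

-- A's result is B's result: both map the sorted distinct genres to (genre, count, sorted names)
theorem pv_main (artists : List (String × String)) :
    artistas_x_genero artists = artistas_x_genero_alt artists := by
  obtain ⟨h2, h3⟩ := pvLoopA_inv artists PySem.Dict.empty [] (fun _ => 0) (fun _ => [])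
    (by simp [PySem.Dict.contains_empty]) (by simp) (by simp)
  have hset : (artists.foldl pvStepA (PySem.Dict.empty, [])).2
      = PySem.Set.ofList (artists.map (fun a => a.2)) := by
    rw [h2, PySem.Set.ofList_eq_foldl]; rfl
  simp only [artistas_x_genero, artistas_x_genero_alt, hset]
  apply List.map_congr_left
  intro g hg
  have hg1 : g ∈ PySem.Set.ofList (artists.map (fun a => a.2)) :=
    (PySem.List.mem_sorted _ _ _ _).mp hg
  have hg2 : g ∈ (artists.foldl pvStepA (PySem.Dict.empty, [])).2 := hset ▸ hg1
  have hget := (h3 g).2 hg2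
  rw [hget]
  have hlen : ((artists.map (fun a => a.2)).count g : Int)
      = ((PySem.List.sorted ((artists.filter (fun a => a.2 == g)).map (fun a => a.1))
          (fun n => n) false).length : Int) := by
    rw [PySem.List.length_sorted, List.length_map, List.count_eq_countP,
      List.countP_map, List.countP_eq_length_filter]
    rfl
  simp [hlen]

-- ===== VERDICT (by name: the statement is the Claim_ definition above) =====
theorem artistas_x_genero_spec : Claim_equal_artistas_x_genero := by
  intro artists _
  unfold Spec_artistas_x_genero
  exact pv_main artists
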